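-- pv_equiv track=rewrite | github.com/MatijaPasch/CubeLHP | verification/createNormalisedConfigs.py | compare_configurations
-- ===== SOURCE A (Python) =====
-- def compare_configurations(config1,config2):
--   for i in range(4):
--     for j in range(4):
--       if config1[j][i]<config2[j][i]:
--         return -1
--       if config1[j][i]>config2[j][i]:
--         return 1
--   return 0
-- ===== SOURCE B (Python) =====
-- def compare_configurations(config1, config2):
--     def go(k):
--         if k == 16:
--             return 0
--         x = config1[k % 4][k // 4]
--         y = config2[k % 4][k // 4]
--         return (x > y) - (x < y) or go(k + 1)
--     return go(0)
-- ===== Notes on version B (the rewrite author's own statement) =====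
-- stated objective: alternative
-- what changed: Replaces the two nested index loops with per-cell double comparison and two early returns by a single recursion over one flattened cell index decoded with divmod, computing each cell's sign arithmetically as (x > y) - (x < y) and chaining with 'or'.
import Mathlib
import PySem

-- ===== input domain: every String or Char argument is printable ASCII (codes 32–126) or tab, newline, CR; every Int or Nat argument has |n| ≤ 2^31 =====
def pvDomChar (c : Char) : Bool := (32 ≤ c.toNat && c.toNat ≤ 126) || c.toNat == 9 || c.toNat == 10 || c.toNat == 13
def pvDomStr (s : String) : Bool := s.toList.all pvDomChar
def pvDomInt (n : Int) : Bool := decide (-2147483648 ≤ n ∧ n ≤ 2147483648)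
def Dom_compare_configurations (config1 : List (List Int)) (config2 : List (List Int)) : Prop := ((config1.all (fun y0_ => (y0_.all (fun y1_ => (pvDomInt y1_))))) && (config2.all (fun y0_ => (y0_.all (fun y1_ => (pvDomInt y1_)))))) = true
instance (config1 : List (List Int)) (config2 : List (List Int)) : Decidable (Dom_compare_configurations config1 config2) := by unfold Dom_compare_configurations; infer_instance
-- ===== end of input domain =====

-- B replaces the two nested index loops with early returns by a single recursion over
-- one flattened cell index decoded with divmod and an arithmetic sign chained with 'or'.

-- ===== PORT A =====
-- inner 'for j in range(4)' at column i; config[j][i] via pyGet? ('none' = IndexError,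
-- where the 'some 0' escape value is arbitrary: the differential test only sees inputs
-- on which the Python returns, and there every get is 'some')
def pvInnerA (c1 c2 : List (List Int)) (i : Int) : List Int → Option Int
  | [] => none
  | j :: js =>
    match (PySem.List.pyGet? c1 j).bind (fun r => PySem.List.pyGet? r i),
          (PySem.List.pyGet? c2 j).bind (fun r => PySem.List.pyGet? r i) with
    | some x, some y =>
      if x < y then some (-1)
      else if x > y then some 1
      else pvInnerA c1 c2 i js
    | _, _ => some 0   -- IndexError escape
def pvOuterA (c1 c2 : List (List Int)) : List Int → Int
  | [] => 0
  | i :: is =>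
    match pvInnerA c1 c2 i (PySem.List.pyRange 0 4 1) with
    | some r => r
    | none => pvOuterA c1 c2 is

def compare_configurations (config1 : List (List Int)) (config2 : List (List Int)) : Int :=
  pvOuterA config1 config2 (PySem.List.pyRange 0 4 1)

-- ===== PORT B =====
-- 'def go(k)': k counts 0..16; Python's k % 4 / k // 4 on the nonnegative k are exactly
-- Nat mod/div (cast to Int for the index); '(x > y) - (x < y) or go(k+1)' is the sign
-- expression, with 0 falsy so 'or' recurses ('none' get = the cell access's IndexError,
-- escape value 0 arbitrary as in port A). Python tests 'k == 16'; since go is only ever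
-- called with k ≤ 16 the '16 ≤ k' guard is the same test on every reachable argument
-- (written with ≤ solely so the recursion is total for Lean on unreachable k > 16)
def pvGoB (c1 c2 : List (List Int)) (k : Nat) : Int :=
  if _h : 16 ≤ k then 0
  else
    match (PySem.List.pyGet? c1 ((k % 4 : Nat) : Int)).bind
            (fun r => PySem.List.pyGet? r ((k / 4 : Nat) : Int)),
          (PySem.List.pyGet? c2 ((k % 4 : Nat) : Int)).bind
            (fun r => PySem.List.pyGet? r ((k / 4 : Nat) : Int)) with
    | some x, some y =>
      let s : Int := (if x > y then 1 else 0) - (if x < y then 1 else 0)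
      if s ≠ 0 then s else pvGoB c1 c2 (k + 1)
    | _, _ => 0   -- IndexError escape
termination_by 16 - k
decreasing_by omega

def compare_configurations_alt (config1 : List (List Int)) (config2 : List (List Int)) : Int :=
  pvGoB config1 config2 0

-- ===== PRECONDITION & SPEC =====
-- cell k (column-major: row k % 4, column k / 4) exists / its value
def pvHas (cfg : List (List Int)) (k : Nat) : Bool :=
  match cfg[k % 4]? with
  | some r => k / 4 < r.length
  | none => false
def pvAt (cfg : List (List Int)) (k : Nat) : Int :=
  ((cfg[k % 4]?).getD [])[k / 4]?.getD 0

-- exactly the inputs on which A returns (no IndexError): either all 16 cells exist in both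
-- configurations, or some scanned cell differs and every cell up to it exists in both
-- (B raises exactly where A raises, so nothing else is excluded)
def Pre_compare_configurations (config1 : List (List Int)) (config2 : List (List Int)) : Prop :=
  (∀ k < 16, pvHas config1 k ∧ pvHas config2 k) ∨
  (∃ k < 16, (∀ m ≤ k, pvHas config1 m ∧ pvHas config2 m) ∧ pvAt config1 k ≠ pvAt config2 k)
instance (config1 : List (List Int)) (config2 : List (List Int)) : Decidable (Pre_compare_configurations config1 config2) := by unfold Pre_compare_configurations; infer_instance

def pvWitness_compare_configurations : List (List Int) × List (List Int) :=
  ([[1,2,3,4],[5,6,7,8],[9,10,11,12],[13,14,15,16]],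
   [[1,2,3,4],[5,6,7,8],[9,10,11,12],[13,14,15,17]])

def Spec_compare_configurations (config1 : List (List Int)) (config2 : List (List Int)) (out : Int) : Prop := out = compare_configurations_alt config1 config2
instance (config1 : List (List Int)) (config2 : List (List Int)) (out : Int) : Decidable (Spec_compare_configurations config1 config2 out) := by unfold Spec_compare_configurations; infer_instance

-- ===== CLAIM (what is proved, stated in full; the proofs are below) =====
def Claim_equal_compare_configurations : Prop := ∀ (config1 : List (List Int)) (config2 : List (List Int)), Dom_compare_configurations config1 config2 → Pre_compare_configurations config1 config2 → Spec_compare_configurations config1 config2 (compare_configurations config1 config2)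

-- ===== LEMMAS AND PROOFS =====

-- the shared column-major cell stream, and A's two loops rewritten as one scan over it
def pvPairs : List (Int × Int) :=
  (PySem.List.pyRange 0 4 1).flatMap (fun i =>
    (PySem.List.pyRange 0 4 1).map (fun j => (i, j)))

def pvScan (c1 c2 : List (List Int)) : List (Int × Int) → Int
  | [] => 0
  | (i, j) :: rest =>
    match (PySem.List.pyGet? c1 j).bind (fun r => PySem.List.pyGet? r i),
          (PySem.List.pyGet? c2 j).bind (fun r => PySem.List.pyGet? r i) with
    | some x, some y => if x < y then -1 else if x > y then 1 else pvScan c1 c2 rest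
    | _, _ => 0

theorem pvScanBlock (c1 c2 : List (List Int)) (i : Int) (js : List Int) (rest : List (Int × Int)) :
    pvScan c1 c2 (js.map (fun j => (i, j)) ++ rest) =
      match pvInnerA c1 c2 i js with
      | some r => r
      | none => pvScan c1 c2 rest := by
  induction js with
  | nil => simp [pvInnerA]
  | cons j js ih =>
    simp only [List.map_cons, List.cons_append, pvScan, pvInnerA]
    cases h1 : (PySem.List.pyGet? c1 j).bind (fun r => PySem.List.pyGet? r i) with
    | none => rfl
    | some x =>
      cases h2 : (PySem.List.pyGet? c2 j).bind (fun r => PySem.List.pyGet? r i) with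
      | none => rfl
      | some y =>
        by_cases hlt : x < y
        · simp [hlt]
        · by_cases hgt : x > y
          · simp [hlt, hgt]
          · simp [hlt, hgt, ih]

theorem pvOuterA_eq_scan (c1 c2 : List (List Int)) (is : List Int) :
    pvOuterA c1 c2 is =
      pvScan c1 c2 (is.flatMap (fun i => (PySem.List.pyRange 0 4 1).map (fun j => (i, j)))) := by
  induction is with
  | nil => rfl
  | cons i is ih => simp only [pvOuterA, List.flatMap_cons, pvScanBlock, ih]

-- the k-th element of the concrete 16-pair stream decodes k by divmod
theorem pvPairs_drop (k : Nat) (hk : k < 16) :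
    pvPairs.drop k = (((k : Int) / 4), ((k : Int) % 4)) :: pvPairs.drop (k + 1) := by
  interval_cases k <;> decide

-- B's recursion from index k is A's scan of the remaining cell stream
theorem pvGoB_eq_scan (c1 c2 : List (List Int)) (k : Nat) (hk : k ≤ 16) :
    pvGoB c1 c2 k = pvScan c1 c2 (pvPairs.drop k) := by
  induction h : 16 - k generalizing k with
  | zero =>
    have hk16 : k = 16 := by omega
    subst hk16
    rw [(by decide : pvPairs.drop 16 = [])]
    unfold pvGoB
    simp [pvScan]
  | succ n ih =>
    have hk16 : k < 16 := by omega
    rw [pvPairs_drop k hk16]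
    unfold pvGoB
    rw [dif_neg (by omega : ¬ 16 ≤ k)]
    cases h1 : (PySem.List.pyGet? c1 ((k : Int) % 4)).bind
        (fun r => PySem.List.pyGet? r ((k : Int) / 4)) with
    | none => simp [pvScan, h1]
    | some x =>
      cases h2 : (PySem.List.pyGet? c2 ((k : Int) % 4)).bind
          (fun r => PySem.List.pyGet? r ((k : Int) / 4)) with
      | none => simp [pvScan, h1, h2]
      | some y =>
        have hrec := ih (k + 1) (by omega) (by omega)
        simp only [pvScan, h1, h2]
        by_cases hlt : x < y
        · simp [h1, h2, hlt, not_lt_of_gt hlt]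
        · by_cases hgt : x > y
          · simp [h1, h2, hlt, hgt]
          · have hxy : x = y := le_antisymm (not_lt.mp hgt) (not_lt.mp hlt)
            simp [h1, h2, hxy, hrec]

-- ===== VERDICT (by name: the statement is the Claim_ definition above) =====
theorem compare_configurations_spec : Claim_equal_compare_configurations := by
  intro c1 c2 _ _
  unfold Spec_compare_configurations compare_configurations compare_configurations_alt
  rw [pvOuterA_eq_scan, pvGoB_eq_scan c1 c2 0 (by omega)]
  rfl
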